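-- pv_equiv track=rewrite | github.com/edenozery/MEM-Rearrange | main_all.py | get_diff_by_edges
-- ===== SOURCE A (Python) =====
-- def get_in_edges(node, edges):
--     in_edges = []
--     for edge in edges:
--         if edge[1] == node:
--             in_edges.append(edge)
--     return in_edges
--
-- def get_diff_by_edges(nodes, new_edges_jaccard, new_edges_breakpoint, net_edges):
--     total_diff = 0
--     for node in nodes:
--         in_edges_net = get_in_edges(node, net_edges)
--         if len(in_edges_net) > 0:
--             in_edges_jaccard = get_in_edges(node, new_edges_jaccard)
--             in_edges_bp = get_in_edges(node, new_edges_breakpoint)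
--             # similarity = len(set(in_edges_jaccard).intersection(set(in_edges_bp))) / len(in_edges_jaccard)
--             # difference = len(in_edges_bp) / len(net_edges)
--             similarity = len(set(in_edges_jaccard).intersection(set(in_edges_bp)))
--             difference = len(set(in_edges_bp).difference(set(in_edges_jaccard)))
--             total_diff += similarity - difference
--             # if len(set(in_edges_jaccard).difference(set(in_edges_bp))) == 0:
--             #     total_diff += math.log2(len(in_edges_net) / len(in_edges_bp))
--             # else:
--             #     total_diff += math.log2(1 - (len(in_edges_bp) / len(in_edges_net)))
--
--     return total_diff
-- ===== SOURCE B (Python) =====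
-- def get_diff_by_edges(nodes, new_edges_jaccard, new_edges_breakpoint, net_edges):
--     # One edge-centric pass over the distinct breakpoint edges: each distinct bp
--     # edge e contributes +1 (if e is also a jaccard edge) or -1 per occurrence of
--     # its target node in `nodes`, provided that node has an in-edge in net_edges.
--     net_targets = {e[1] for e in net_edges}
--     jac = set(new_edges_jaccard)
--     mult = {}
--     for n in nodes:
--         mult[n] = mult.get(n, 0) + 1
--     total = 0
--     for e in dict.fromkeys(new_edges_breakpoint):
--         node = e[1]
--         if node in net_targets:
--             total += mult.get(node, 0) * (1 if e in jac else -1)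
--     return total
-- ===== Notes on version B (the rewrite author's own statement) =====
-- stated objective: faster
-- what changed: Replaces A's per-node rescans of all three edge lists (and per-node set constructions) by one edge-centric pass: precompute the set of net-edge targets, the set of jaccard edges and a multiplicity dict for nodes, then fold once over the distinct breakpoint edges, each contributing multiplicity(target) * (+1 if it is a jaccard edge else -1).
import Mathlib
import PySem

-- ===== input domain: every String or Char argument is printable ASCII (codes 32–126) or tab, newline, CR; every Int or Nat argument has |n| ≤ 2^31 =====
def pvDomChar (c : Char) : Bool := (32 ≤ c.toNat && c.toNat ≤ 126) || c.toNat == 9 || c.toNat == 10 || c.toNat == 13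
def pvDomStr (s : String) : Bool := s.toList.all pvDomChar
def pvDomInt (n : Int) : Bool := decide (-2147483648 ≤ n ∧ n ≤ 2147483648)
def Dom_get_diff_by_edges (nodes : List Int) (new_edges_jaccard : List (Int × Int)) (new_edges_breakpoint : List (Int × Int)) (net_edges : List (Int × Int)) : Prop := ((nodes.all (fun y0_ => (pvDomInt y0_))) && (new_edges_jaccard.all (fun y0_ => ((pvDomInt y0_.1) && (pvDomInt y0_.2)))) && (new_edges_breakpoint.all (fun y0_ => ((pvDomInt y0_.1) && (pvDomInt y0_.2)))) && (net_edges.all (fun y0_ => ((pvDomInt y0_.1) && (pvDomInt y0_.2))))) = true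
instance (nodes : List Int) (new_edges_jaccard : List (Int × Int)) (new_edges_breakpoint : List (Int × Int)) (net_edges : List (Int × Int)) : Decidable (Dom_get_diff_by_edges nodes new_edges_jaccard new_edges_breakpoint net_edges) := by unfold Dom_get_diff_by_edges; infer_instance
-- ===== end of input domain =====

-- B replaces A's per-node rescans of all three edge lists by a single edge-centric
-- pass over the distinct breakpoint edges, using precomputed sets and a node
-- multiplicity table (objective: faster, asymptotically).


-- ===== PORT A =====
def get_in_edges (node : Int) (edges : List (Int × Int)) : List (Int × Int) :=
  edges.foldl (fun in_edges edge => if edge.2 == node then in_edges ++ [edge] else in_edges) []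

def get_diff_by_edges (nodes : List Int) (new_edges_jaccard : List (Int × Int)) (new_edges_breakpoint : List (Int × Int)) (net_edges : List (Int × Int)) : Int :=
  nodes.foldl (fun total_diff node =>
    let in_edges_net := get_in_edges node net_edges
    if in_edges_net.length > 0 then
      let in_edges_jaccard := get_in_edges node new_edges_jaccard
      let in_edges_bp := get_in_edges node new_edges_breakpoint
      let similarity : Int := (PySem.Set.inter (PySem.Set.ofList in_edges_jaccard) (PySem.Set.ofList in_edges_bp)).length
      let difference : Int := (PySem.Set.diff (PySem.Set.ofList in_edges_bp) (PySem.Set.ofList in_edges_jaccard)).length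
      total_diff + (similarity - difference)
    else total_diff) 0

-- ===== PORT B =====
def get_diff_by_edges_alt (nodes : List Int) (new_edges_jaccard : List (Int × Int)) (new_edges_breakpoint : List (Int × Int)) (net_edges : List (Int × Int)) : Int :=
  let netTargets := PySem.Set.ofList (net_edges.map (fun e => e.2))
  let jac := PySem.Set.ofList new_edges_jaccard
  let mult := nodes.foldl (fun d n => d.insert n (d.getD n 0 + 1)) PySem.Dict.empty
  (PySem.List.dedup new_edges_breakpoint).foldl (fun total e =>
    if PySem.Set.contains netTargets e.2 then
      total + mult.getD e.2 0 * (if PySem.Set.contains jac e then 1 else -1)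
    else total) 0

-- ===== PRECONDITION & SPEC =====
def Spec_get_diff_by_edges (nodes : List Int) (new_edges_jaccard : List (Int × Int)) (new_edges_breakpoint : List (Int × Int)) (net_edges : List (Int × Int)) (out : Int) : Prop := out = get_diff_by_edges_alt nodes new_edges_jaccard new_edges_breakpoint net_edges
instance (nodes : List Int) (new_edges_jaccard : List (Int × Int)) (new_edges_breakpoint : List (Int × Int)) (net_edges : List (Int × Int)) (out : Int) : Decidable (Spec_get_diff_by_edges nodes new_edges_jaccard new_edges_breakpoint net_edges out) := by unfold Spec_get_diff_by_edges; infer_instance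

-- ===== CLAIM (what is proved, stated in full; the proofs are below) =====
def Claim_equal_get_diff_by_edges : Prop := ∀ (nodes : List Int) (new_edges_jaccard : List (Int × Int)) (new_edges_breakpoint : List (Int × Int)) (net_edges : List (Int × Int)), Dom_get_diff_by_edges nodes new_edges_jaccard new_edges_breakpoint net_edges → Spec_get_diff_by_edges nodes new_edges_jaccard new_edges_breakpoint net_edges (get_diff_by_edges nodes new_edges_jaccard new_edges_breakpoint net_edges)

-- ===== LEMMAS AND PROOFS =====

-- the per-edge sign: +1 for a jaccard edge, -1 otherwise
def pvSgn (jac : List (Int × Int)) (e : Int × Int) : Int := if e ∈ jac then 1 else -1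

-- the summand of the exchanged double sum
def pvH (jac net : List (Int × Int)) (n : Int) (e : Int × Int) : Int :=
  if e.2 = n ∧ e.2 ∈ net.map (fun e => e.2) then pvSgn jac e else 0

lemma get_in_edges_eq (n : Int) (edges : List (Int × Int)) :
    get_in_edges n edges = edges.filter (fun e => e.2 == n) := by
  unfold get_in_edges
  exact PySem.List.foldl_append_if_eq_filter (fun e => e.2 == n) edges []

-- |{x ∈ J : x ∈ B}| = |{x ∈ B : x ∈ J}| for duplicate-free lists
lemma filter_mem_length_comm {α : Type} [BEq α] [LawfulBEq α] (J B : List α)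
    (hJ : J.Nodup) (hB : B.Nodup) :
    (J.filter (fun x => decide (x ∈ B))).length = (B.filter (fun x => decide (x ∈ J))).length := by
  refine List.Perm.length_eq ?_
  refine (List.perm_ext_iff_of_nodup (hJ.filter _) (hB.filter _)).mpr ?_
  intro x; simp [List.mem_filter]; tauto

lemma sum_pm_split {α : Type} (l : List α) (p : α → Bool) :
    ((l.filter p).length : Int) - ((l.filter (fun x => !p x)).length : Int)
      = (l.map (fun x => if p x then (1 : Int) else -1)).sum := by
  induction l with
  | nil => simp
  | cons a t ih =>
    by_cases h : p a = true <;> simp [h] <;> omega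

lemma sum_map_ite_filter {α : Type} (l : List α) (p : α → Prop) [DecidablePred p] (f : α → Int) :
    (l.map (fun x => if p x then f x else 0)).sum
      = ((l.filter (fun x => decide (p x))).map f).sum := by
  induction l with
  | nil => simp
  | cons a t ih =>
    by_cases h : p a <;> simp [h, ih]

lemma sum_exchange (ns : List Int) (E : List (Int × Int)) (h : Int → (Int × Int) → Int) :
    (ns.map (fun n => (E.map (h n)).sum)).sum
      = (E.map (fun e => (ns.map (fun n => h n e)).sum)).sum := by
  induction ns with
  | nil => simp
  | cons a t ih =>
    simp only [List.map_cons, List.sum_cons, ih, PySem.List.sum_map_add_int]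

lemma sum_count (ns : List Int) (v : Int) (c : Int) :
    (ns.map (fun n => if v = n then c else 0)).sum = (ns.count v : Int) * c := by
  induction ns with
  | nil => simp
  | cons a t ih =>
    by_cases h : v = a
    · subst h
      simp only [List.map_cons, List.sum_cons, List.count_cons_self, ih]
      push_cast; ring
    · simp only [List.map_cons, List.sum_cons, if_neg h, ih,
        List.count_cons_of_ne (fun hne => h hne.symm)]
      ring

-- A's per-node contribution equals the row of the exchanged sum
lemma node_contribution (jacL bpL netL : List (Int × Int)) (n : Int) :
    (if 0 < (get_in_edges n netL).length then
        ((PySem.Set.inter (PySem.Set.ofList (get_in_edges n jacL))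
            (PySem.Set.ofList (get_in_edges n bpL))).length : Int)
          - ((PySem.Set.diff (PySem.Set.ofList (get_in_edges n bpL))
            (PySem.Set.ofList (get_in_edges n jacL))).length : Int)
      else 0)
      = ((PySem.List.dedup bpL).map (pvH jacL netL n)).sum := by
  by_cases hc : 0 < (get_in_edges n netL).length
  · -- n really is a target of some net edge
    have hn : n ∈ netL.map (fun e => e.2) := by
      rw [get_in_edges_eq] at hc
      rcases List.length_pos_iff_exists_mem.mp hc with ⟨e, he⟩
      rcases List.mem_filter.mp he with ⟨hmem, hEq⟩
      exact List.mem_map.mpr ⟨e, hmem, by simpa using hEq.symm⟩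
    simp only [hc, if_pos]
    set J := PySem.Set.ofList (get_in_edges n jacL) with hJdef
    set Bp := PySem.Set.ofList (get_in_edges n bpL) with hBdef
    have hJnd : J.Nodup := PySem.Set.nodup_ofList _
    have hBnd : Bp.Nodup := PySem.Set.nodup_ofList _
    -- contains = decide-membership
    have hsim : (PySem.Set.inter J Bp).length = (Bp.filter (fun x => decide (x ∈ J))).length := by
      have : PySem.Set.inter J Bp = J.filter (fun x => decide (x ∈ Bp)) := by
        simp [PySem.Set.inter, PySem.Set.contains]
      rw [this]
      exact filter_mem_length_comm J Bp hJnd hBnd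
    have hdiff : PySem.Set.diff Bp J = Bp.filter (fun x => !decide (x ∈ J)) := by
      simp [PySem.Set.diff, PySem.Set.contains]
    rw [hsim, hdiff, sum_pm_split Bp (fun x => decide (x ∈ J))]
    -- on elements of Bp, membership in J is membership in jacL, so the sign is pvSgn
    have hcongr : Bp.map (fun x => if decide (x ∈ J) = true then (1 : Int) else -1)
        = Bp.map (pvSgn jacL) := by
      refine List.map_congr_left ?_
      intro x hx
      have hxbp : x ∈ get_in_edges n bpL := (PySem.Set.mem_ofList _ _).mp hx
      have hx2 : x.2 = n := by
        rw [get_in_edges_eq] at hxbp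
        simpa using (List.mem_filter.mp hxbp).2
      have : x ∈ J ↔ x ∈ jacL := by
        rw [hJdef, PySem.Set.mem_ofList, get_in_edges_eq, List.mem_filter]
        simp [hx2]
      simp only [pvSgn, this]
      by_cases hxj : x ∈ jacL <;> simp [hxj]
    rw [hcongr]
    -- Bp is a permutation of the matching slice of the deduped breakpoint list
    have hperm : Bp.Perm ((PySem.List.dedup bpL).filter (fun e => decide (e.2 = n))) := by
      refine (List.perm_ext_iff_of_nodup hBnd ((PySem.List.nodup_dedup bpL).filter _)).mpr ?_
      intro x
      rw [hBdef, PySem.Set.mem_ofList, get_in_edges_eq, List.mem_filter, List.mem_filter,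
        PySem.List.mem_dedup]
      simp
    rw [List.Perm.sum_eq (hperm.map (pvSgn jacL))]
    -- and the row of pvH is exactly that filtered sum
    have : ((PySem.List.dedup bpL).map (pvH jacL netL n)).sum
        = (((PySem.List.dedup bpL).filter (fun e => decide (e.2 = n))).map (pvSgn jacL)).sum := by
      rw [← sum_map_ite_filter (PySem.List.dedup bpL) (fun e => e.2 = n) (pvSgn jacL)]
      refine congrArg List.sum (List.map_congr_left ?_)
      intro e _
      simp only [pvH]
      by_cases h2 : e.2 = n
      · simp [h2, hn]
      · simp [h2]
    rw [this]
  · -- no net in-edge targets n : both sides are 0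
    simp only [hc, if_neg, not_false_iff]
    have hn : n ∉ netL.map (fun e => e.2) := by
      intro hm
      rcases List.mem_map.mp hm with ⟨e, he, hEq⟩
      apply hc
      rw [get_in_edges_eq]
      refine List.length_pos_iff_exists_mem.mpr ⟨e, List.mem_filter.mpr ⟨he, by simpa using hEq⟩⟩
    have : ∀ e ∈ PySem.List.dedup bpL, pvH jacL netL n e = 0 := by
      intro e _
      simp only [pvH]
      by_cases h2 : e.2 = n
      · simp [h2, hn]
      · simp [h2]
    rw [List.map_congr_left this]
    simp

-- B's per-edge contribution equals the column of the exchanged sum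
lemma edge_contribution (ns : List Int) (jacL netL : List (Int × Int)) (e : Int × Int) :
    (ns.map (fun n => pvH jacL netL n e)).sum
      = if e.2 ∈ netL.map (fun x => x.2) then (ns.count e.2 : Int) * pvSgn jacL e else 0 := by
  by_cases ht : e.2 ∈ netL.map (fun x => x.2)
  · simp only [ht, if_pos]
    rw [← sum_count ns e.2 (pvSgn jacL e)]
    refine congrArg List.sum (List.map_congr_left ?_)
    intro n _
    simp only [pvH]
    by_cases h2 : e.2 = n
    · rw [if_pos ⟨h2, ht⟩, if_pos h2]
    · rw [if_neg (fun hc => h2 hc.1), if_neg h2]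
  · simp only [ht, if_neg, not_false_iff]
    have : ∀ n ∈ ns, pvH jacL netL n e = 0 := by
      intro n _
      simp only [pvH]
      rw [if_neg (fun hc => ht hc.2)]
    rw [List.map_congr_left this]
    simp

-- ===== VERDICT (by name: the statement is the Claim_ definition above) =====
theorem get_diff_by_edges_spec : Claim_equal_get_diff_by_edges := by
  intro nodes jacL bpL netL _dom
  unfold Spec_get_diff_by_edges
  simp only [get_diff_by_edges, get_diff_by_edges_alt]
  -- A as a sum over nodes
  have hA : List.foldl
      (fun total_diff node =>
        if (get_in_edges node netL).length > 0 then
          total_diff +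
            ((((PySem.Set.ofList (get_in_edges node jacL)).inter
                (PySem.Set.ofList (get_in_edges node bpL))).length : Int) -
              (((PySem.Set.ofList (get_in_edges node bpL)).diff
                (PySem.Set.ofList (get_in_edges node jacL))).length : Int))
        else total_diff) 0 nodes
      = List.foldl
      (fun total_diff node => total_diff +
        (if 0 < (get_in_edges node netL).length then
          ((((PySem.Set.ofList (get_in_edges node jacL)).inter
              (PySem.Set.ofList (get_in_edges node bpL))).length : Int) -
            (((PySem.Set.ofList (get_in_edges node bpL)).diff
              (PySem.Set.ofList (get_in_edges node jacL))).length : Int))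
        else 0)) 0 nodes := by
    refine PySem.List.foldl_congr_mem _ _ _ _ ?_
    intro acc n _
    by_cases hc : 0 < (get_in_edges n netL).length <;> simp [hc]
  rw [hA, PySem.List.foldl_add]
  -- B as a sum over the distinct breakpoint edges
  have hB : List.foldl
      (fun total e =>
        if (PySem.Set.ofList (netL.map (fun e => e.2))).contains e.2 = true then
          total +
            (List.foldl (fun d n => d.insert n (d.getD n 0 + 1)) PySem.Dict.empty nodes).getD e.2 0 *
              if (PySem.Set.ofList jacL).contains e = true then 1 else -1
        else total) 0 (PySem.List.dedup bpL)
      = List.foldl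
      (fun total e => total +
        (if e.2 ∈ netL.map (fun x => x.2) then ((nodes.count e.2 : Int)) * pvSgn jacL e else 0))
      0 (PySem.List.dedup bpL) := by
    refine PySem.List.foldl_congr_mem _ _ _ _ ?_
    intro acc e _
    have htar : (PySem.Set.ofList (netL.map (fun e => e.2))).contains e.2
        = decide (e.2 ∈ netL.map (fun x => x.2)) := by
      simp [PySem.Set.contains, PySem.Set.mem_ofList]
    have hget : (nodes.foldl (fun d n => d.insert n (d.getD n 0 + 1)) PySem.Dict.empty).getD e.2 0
        = (nodes.count e.2 : Int) := by
      rw [PySem.Dict.getD_foldl_insert_add_one]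
      simp
    have hjac : (PySem.Set.ofList jacL).contains e = decide (e ∈ jacL) := by
      simp [PySem.Set.contains, PySem.Set.mem_ofList]
    rw [htar, hget, hjac]
    by_cases h : e.2 ∈ netL.map (fun x => x.2) <;>
      by_cases hj : e ∈ jacL <;> simp [h, hj, pvSgn]
  rw [hB, PySem.List.foldl_add]
  -- the two sums are equal by the exchange identity
  simp only [zero_add]
  calc (nodes.map (fun n =>
          if 0 < (get_in_edges n netL).length then
            ((((PySem.Set.ofList (get_in_edges n jacL)).inter
                (PySem.Set.ofList (get_in_edges n bpL))).length : Int) -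
              (((PySem.Set.ofList (get_in_edges n bpL)).diff
                (PySem.Set.ofList (get_in_edges n jacL))).length : Int))
          else 0)).sum
      = (nodes.map (fun n => ((PySem.List.dedup bpL).map (pvH jacL netL n)).sum)).sum := by
        exact congrArg List.sum (List.map_congr_left (fun n _ => node_contribution jacL bpL netL n))
    _ = ((PySem.List.dedup bpL).map (fun e => (nodes.map (fun n => pvH jacL netL n e)).sum)).sum :=
        sum_exchange nodes (PySem.List.dedup bpL) (pvH jacL netL)
    _ = ((PySem.List.dedup bpL).map (fun e =>
          if e.2 ∈ netL.map (fun x => x.2) then ((nodes.count e.2 : Int)) * pvSgn jacL e else 0)).sum := by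
        exact congrArg List.sum (List.map_congr_left (fun e _ => edge_contribution nodes jacL netL e))
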